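-- pv_equiv track=rewrite | github.com/mohammadT77/BigData-Spark-Partitions | G021HW2.py | count_triangles2
-- ===== SOURCE A (Python) =====
-- from collections import defaultdict
--
-- def count_triangles2(colors_tuple, edges, rand_a, rand_b, p, num_colors):
--     #We assume colors_tuple to be already sorted by increasing colors. Just transform in a list for simplicity
--     colors = list(colors_tuple)
--     #Create a dictionary for adjacency list
--     neighbors = defaultdict(set)
--     #Creare a dictionary for storing node colors
--     node_colors = dict()
--     for edge in edges:
--
--         u, v = edge
--         node_colors[u]= ((rand_a*u+rand_b)%p)%num_colors
--         node_colors[v]= ((rand_a*v+rand_b)%p)%num_colors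
--         neighbors[u].add(v)
--         neighbors[v].add(u)
--
--     # Initialize the triangle count to zero
--     triangle_count = 0
--
--     # Iterate over each vertex in the graph
--     for v in neighbors:
--         # Iterate over each pair of neighbors of v
--         for u in neighbors[v]:
--             if u > v:
--                 for w in neighbors[u]:
--                     # If w is also a neighbor of v, then we have a triangle
--                     if w > u and w in neighbors[v]:
--                         # Sort colors by increasing values
--                         triangle_colors = sorted((node_colors[u], node_colors[v], node_colors[w]))
--                         # If triangle has the right colors, count it.
--                         if colors==triangle_colors:
--                             triangle_count += 1
--     # Return the total number of triangles in the graph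
--     return triangle_count
-- ===== SOURCE B (Python) =====
-- def count_triangles2(colors_tuple, edges, rand_a, rand_b, p, num_colors):
--     target = list(colors_tuple)
--
--     # pass 1: the set of distinct normalized (min, max) edges (self-loops dropped)
--     eset = set()
--     for u, v in edges:
--         if u != v:
--             eset.add((u, v) if u < v else (v, u))
--
--     # pass 2: per-node color and, for each node, the list of its GREATER neighbors
--     col = {}
--     greater = {}
--     for u, v in eset:  # u < v
--         col[u] = ((rand_a * u + rand_b) % p) % num_colors
--         col[v] = ((rand_a * v + rand_b) % p) % num_colors
--         greater.setdefault(u, []).append(v)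
--
--     # pass 3: wedge enumeration at the minimum vertex of the triangle:
--     # for each apex v, every pair u < w taken from v's sorted greater-neighbor
--     # list is a candidate triangle closed by one lookup in the edge set.
--     count = 0
--     for v in greater:
--         cv = col[v]
--         rest = sorted(greater[v])
--         while rest:
--             u, rest = rest[0], rest[1:]
--             cu = col[u]
--             for w in rest:
--                 if (u, w) in eset and sorted((cv, cu, col[w])) == target:
--                     count += 1
--     return count
-- ===== Notes on version B (the rewrite author's own statement) =====
-- stated objective: alternative
-- what changed: B replaces A's neighbor-set intersection (for each vertex v and each greater neighbor u, scan all of u's neighbors testing membership in v's set) by wedge enumeration at the triangle's minimum vertex: it builds per node the sorted list of strictly greater neighbors and closes each candidate pair from that list with a single lookup in a global normalized-edge set.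
import Mathlib
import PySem

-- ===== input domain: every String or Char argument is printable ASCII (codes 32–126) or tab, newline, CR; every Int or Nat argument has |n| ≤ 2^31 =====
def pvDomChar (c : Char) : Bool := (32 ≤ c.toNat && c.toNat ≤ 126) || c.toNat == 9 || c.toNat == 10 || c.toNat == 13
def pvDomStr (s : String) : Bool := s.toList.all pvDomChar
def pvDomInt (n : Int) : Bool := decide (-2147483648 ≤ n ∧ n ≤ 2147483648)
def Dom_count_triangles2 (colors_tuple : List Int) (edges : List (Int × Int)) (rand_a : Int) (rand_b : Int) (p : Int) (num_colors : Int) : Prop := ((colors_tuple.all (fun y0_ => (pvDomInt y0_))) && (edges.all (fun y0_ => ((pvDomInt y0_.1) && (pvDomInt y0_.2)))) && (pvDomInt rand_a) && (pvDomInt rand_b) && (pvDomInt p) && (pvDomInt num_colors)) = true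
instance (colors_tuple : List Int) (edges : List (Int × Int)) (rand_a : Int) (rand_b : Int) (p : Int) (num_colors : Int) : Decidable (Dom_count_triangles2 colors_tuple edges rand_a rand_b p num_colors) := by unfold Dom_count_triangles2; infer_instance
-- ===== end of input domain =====

-- B counts each triangle at its minimum vertex: per node the sorted list of strictly greater
-- neighbors, and each pair from that list is closed by one lookup in a global normalized-edge
-- set — instead of A's scan of the whole adjacency set of every greater neighbor of every
-- vertex.  Objective: alternative algorithm of comparable measured cost.

-- ===== PORT A =====
def count_triangles2 (colors_tuple : List Int) (edges : List (Int × Int)) (rand_a : Int) (rand_b : Int) (p : Int) (num_colors : Int) : Int :=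
  let colors := colors_tuple
  -- the single 'for edge in edges' loop fills node_colors and neighbors (defaultdict(set))
  let st := edges.foldl
    (fun (st : PySem.Dict Int (PySem.Set Int) × PySem.Dict Int Int) e =>
      let u := e.1
      let v := e.2
      let nc := (st.2.insert u (PySem.Int.mod (PySem.Int.mod (rand_a * u + rand_b) p) num_colors)).insert
                  v (PySem.Int.mod (PySem.Int.mod (rand_a * v + rand_b) p) num_colors)
      let nb := (st.1.modify u PySem.Set.empty (fun s => PySem.Set.add s v)).modify
                  v PySem.Set.empty (fun s => PySem.Set.add s u)
      (nb, nc))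
    (PySem.Dict.empty, PySem.Dict.empty)
  let neighbors := st.1
  let node_colors := st.2
  -- node_colors[x] is looked up with default 0: every vertex reached is an edge endpoint, so the key is present
  neighbors.keys.foldl (fun tc v =>
    (neighbors.getD v PySem.Set.empty).foldl (fun tc u =>
      if u > v then
        (neighbors.getD u PySem.Set.empty).foldl (fun tc w =>
          if decide (w > u) && PySem.Set.contains (neighbors.getD v PySem.Set.empty) w then
            let triangle_colors := PySem.List.sorted
              [node_colors.getD u 0, node_colors.getD v 0, node_colors.getD w 0] (fun x => x)
            if colors = triangle_colors then tc + 1 else tc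
          else tc) tc
      else tc) tc) 0

-- ===== PORT B =====
-- the 'while rest: u, rest = rest[0], rest[1:]; for w in rest: …' loop of Source B
def pvPairScan (target : List Int) (eset : PySem.Set (Int × Int)) (col : PySem.Dict Int Int) (cv : Int) : List Int → Int → Int
  | [], count => count
  | u :: rest, count =>
      let cu := col.getD u 0
      pvPairScan target eset col cv rest
        (rest.foldl (fun c w =>
          if PySem.Set.contains eset (u, w) &&
             decide (PySem.List.sorted [cv, cu, col.getD w 0] (fun x => x) = target)
          then c + 1 else c) count)

def count_triangles2_alt (colors_tuple : List Int) (edges : List (Int × Int)) (rand_a : Int) (rand_b : Int) (p : Int) (num_colors : Int) : Int :=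
  let target := colors_tuple
  -- pass 1: the set of distinct normalized (min, max) edges (self-loops dropped)
  let eset := edges.foldl
    (fun (s : PySem.Set (Int × Int)) e =>
      if e.1 ≠ e.2 then PySem.Set.add s (if e.1 < e.2 then (e.1, e.2) else (e.2, e.1)) else s)
    PySem.Set.empty
  -- pass 2: per-node color and per-node list of GREATER neighbors (setdefault(u, []).append(v))
  let st := eset.foldl
    (fun (st : PySem.Dict Int Int × PySem.Dict Int (List Int)) e =>
      let u := e.1
      let v := e.2
      let col := (st.1.insert u (PySem.Int.mod (PySem.Int.mod (rand_a * u + rand_b) p) num_colors)).insert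
                   v (PySem.Int.mod (PySem.Int.mod (rand_a * v + rand_b) p) num_colors)
      let gr := st.2.modify u ([] : List Int) (fun lst => lst ++ [v])
      (col, gr))
    (PySem.Dict.empty, PySem.Dict.empty)
  let col := st.1
  let greater := st.2
  -- pass 3: wedge enumeration at the minimum vertex
  greater.keys.foldl (fun count v =>
    let cv := col.getD v 0
    pvPairScan target eset col cv (PySem.List.sorted (greater.getD v []) (fun x => x)) count) 0

-- ===== PRECONDITION & SPEC =====
-- Pre_ excludes exactly the inputs on which the Python A raises ZeroDivisionError:
-- a nonempty edge list with p = 0 or num_colors = 0 (A computes a node color for every edge).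
def Pre_count_triangles2 (colors_tuple : List Int) (edges : List (Int × Int)) (rand_a : Int) (rand_b : Int) (p : Int) (num_colors : Int) : Prop :=
  edges = [] ∨ (p ≠ 0 ∧ num_colors ≠ 0)
instance (colors_tuple : List Int) (edges : List (Int × Int)) (rand_a : Int) (rand_b : Int) (p : Int) (num_colors : Int) : Decidable (Pre_count_triangles2 colors_tuple edges rand_a rand_b p num_colors) := by unfold Pre_count_triangles2; infer_instance

def pvWitness_count_triangles2 : List Int × (List (Int × Int)) × Int × Int × Int × Int :=
  ([0, 1, 2], [(1, 2), (2, 3), (1, 3)], 1, 0, 5, 3)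

def Spec_count_triangles2 (colors_tuple : List Int) (edges : List (Int × Int)) (rand_a : Int) (rand_b : Int) (p : Int) (num_colors : Int) (out : Int) : Prop := out = count_triangles2_alt colors_tuple edges rand_a rand_b p num_colors
instance (colors_tuple : List Int) (edges : List (Int × Int)) (rand_a : Int) (rand_b : Int) (p : Int) (num_colors : Int) (out : Int) : Decidable (Spec_count_triangles2 colors_tuple edges rand_a rand_b p num_colors out) := by unfold Spec_count_triangles2; infer_instance

-- ===== CLAIM (what is proved, stated in full; the proofs are below) =====
def Claim_equal_count_triangles2 : Prop := ∀ (colors_tuple : List Int) (edges : List (Int × Int)) (rand_a : Int) (rand_b : Int) (p : Int) (num_colors : Int), Dom_count_triangles2 colors_tuple edges rand_a rand_b p num_colors → Pre_count_triangles2 colors_tuple edges rand_a rand_b p num_colors → Spec_count_triangles2 colors_tuple edges rand_a rand_b p num_colors (count_triangles2 colors_tuple edges rand_a rand_b p num_colors)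

-- ===== LEMMAS AND PROOFS =====

-- proof-side vocabulary -------------------------------------------------------

/-- the directed version of an undirected edge list -/
def pvDir (l : List (Int × Int)) : List (Int × Int) := l.flatMap (fun e => [(e.1, e.2), (e.2, e.1)])

/-- one directed adjacency-insertion step -/
def pvStep1 (d : PySem.Dict Int (PySem.Set Int)) (x : Int × Int) : PySem.Dict Int (PySem.Set Int) :=
  d.modify x.1 PySem.Set.empty (fun s => PySem.Set.add s x.2)

def pvAdj (edges : List (Int × Int)) : PySem.Dict Int (PySem.Set Int) :=
  (pvDir edges).foldl pvStep1 PySem.Dict.empty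

def pvN (edges : List (Int × Int)) (v : Int) : PySem.Set Int :=
  (pvAdj edges).getD v PySem.Set.empty

def pvAdjRel (edges : List (Int × Int)) (v u : Int) : Prop := (v, u) ∈ edges ∨ (u, v) ∈ edges

def pvCol (rand_a rand_b p num_colors x : Int) : Int :=
  PySem.Int.mod (PySem.Int.mod (rand_a * x + rand_b) p) num_colors

/-- the normalized distinct undirected edge set -/
def pvNorm (edges : List (Int × Int)) : PySem.Set (Int × Int) :=
  edges.foldl (fun s e => if e.1 ≠ e.2 then
    PySem.Set.add s (if e.1 < e.2 then (e.1, e.2) else (e.2, e.1)) else s) PySem.Set.empty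

/-- the common per-undirected-edge triangle contribution -/
def pvF (colors : List Int) (edges : List (Int × Int)) (rand_a rand_b p num_colors : Int) (v u : Int) : Int :=
  ((pvN edges u).countP (fun w =>
    decide (w > u) && decide (w ∈ pvN edges v) &&
    decide (colors = PySem.List.sorted
      [pvCol rand_a rand_b p num_colors u, pvCol rand_a rand_b p num_colors v,
       pvCol rand_a rand_b p num_colors w] (fun x => x))) : Nat)

-- structural lemmas -----------------------------------------------------------

theorem pv_adj_fold_eq (l : List (Int × Int)) (d : PySem.Dict Int (PySem.Set Int)) :
    l.foldl (fun d e => (d.modify e.1 PySem.Set.empty (fun s => PySem.Set.add s e.2)).modify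
      e.2 PySem.Set.empty (fun s => PySem.Set.add s e.1)) d = (pvDir l).foldl pvStep1 d := by
  induction l generalizing d with
  | nil => rfl
  | cons e l ih => simp [pvDir, pvStep1, List.flatMap_cons, List.foldl_cons] at *; exact ih _

theorem pv_mem_dir (l : List (Int × Int)) (c w : Int) :
    (c, w) ∈ pvDir l ↔ pvAdjRel l c w := by
  unfold pvDir pvAdjRel
  rw [List.mem_flatMap]
  constructor
  · rintro ⟨⟨a, b⟩, he, hm⟩
    simp only [List.mem_cons, List.not_mem_nil, or_false] at hm
    rcases hm with h | h
    · rw [Prod.mk.injEq] at h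
      obtain ⟨h1, h2⟩ := h
      subst h1; subst h2
      exact Or.inl he
    · rw [Prod.mk.injEq] at h
      obtain ⟨h1, h2⟩ := h
      subst h1; subst h2
      exact Or.inr he
  · rintro (h | h)
    · exact ⟨(c, w), h, by simp⟩
    · exact ⟨(w, c), h, by simp⟩

theorem pv_adj1_getD_mem (l : List (Int × Int)) (d : PySem.Dict Int (PySem.Set Int)) (c w : Int) :
    w ∈ (l.foldl pvStep1 d).getD c PySem.Set.empty ↔
      w ∈ d.getD c PySem.Set.empty ∨ (c, w) ∈ l := by
  induction l generalizing d with
  | nil => simp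
  | cons x l ih =>
    rw [List.foldl_cons, ih]
    unfold pvStep1
    rw [PySem.Dict.getD_modify]
    by_cases hc : c = x.1
    · subst hc
      simp [PySem.Set.mem_add]
      constructor
      · rintro ((h | h) | h)
        · exact Or.inl h
        · exact Or.inr (Or.inl (by rw [h]))
        · exact Or.inr (Or.inr h)
      · rintro (h | (h | h))
        · exact Or.inl (Or.inl h)
        · exact Or.inl (Or.inr (by rw [← h]))
        · exact Or.inr h
    · simp [hc]
      constructor
      · rintro (h | h)
        · exact Or.inl h
        · exact Or.inr (Or.inr h)
      · rintro (h | (h | h))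
        · exact Or.inl h
        · exact absurd (congrArg Prod.fst h).symm (by simpa using fun e => hc e.symm)
        · exact Or.inr h

theorem pv_mem_N (edges : List (Int × Int)) (v u : Int) :
    u ∈ pvN edges v ↔ pvAdjRel edges v u := by
  unfold pvN pvAdj
  rw [pv_adj1_getD_mem, pv_mem_dir]
  simp [PySem.Dict.getD_empty, PySem.Set.empty]

theorem pv_adj1_getD_nodup (l : List (Int × Int)) (d : PySem.Dict Int (PySem.Set Int))
    (h : ∀ c, (d.getD c PySem.Set.empty).Nodup) (c : Int) :
    ((l.foldl pvStep1 d).getD c PySem.Set.empty).Nodup := by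
  induction l generalizing d with
  | nil => exact h c
  | cons x l ih =>
    rw [List.foldl_cons]
    refine ih _ (fun c' => ?_)
    unfold pvStep1
    rw [PySem.Dict.getD_modify]
    split
    · exact PySem.Set.nodup_add _ _ (h _)
    · exact h _

theorem pv_nodup_N (edges : List (Int × Int)) (v : Int) : (pvN edges v).Nodup := by
  unfold pvN pvAdj
  exact pv_adj1_getD_nodup _ _ (by simp [PySem.Dict.getD_empty, PySem.Set.empty]) v

theorem pv_keys_adj (edges : List (Int × Int)) :
    (pvAdj edges).keys = PySem.Set.ofList ((pvDir edges).map Prod.fst) := by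
  unfold pvAdj
  have h := PySem.Dict.keys_foldl_modify_key (pvDir edges) Prod.fst PySem.Set.empty
    (fun _ x s => PySem.Set.add s x.2) PySem.Dict.empty
  simpa [pvStep1, PySem.Dict.keys_empty, PySem.Set.update_empty] using h

theorem pv_mem_keys (edges : List (Int × Int)) (v : Int) :
    v ∈ (pvAdj edges).keys ↔ ∃ u, pvAdjRel edges v u := by
  rw [pv_keys_adj]
  rw [PySem.Set.mem_ofList]
  simp only [List.mem_map]
  constructor
  · rintro ⟨x, hx, rfl⟩
    exact ⟨x.2, (pv_mem_dir edges x.1 x.2).mp hx⟩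
  · rintro ⟨u, hu⟩
    exact ⟨(v, u), (pv_mem_dir edges v u).mpr hu, rfl⟩

theorem pv_nodup_keys (edges : List (Int × Int)) : (pvAdj edges).keys.Nodup := by
  rw [pv_keys_adj]; exact PySem.Set.nodup_ofList _

-- node colors (shared fold shape) ---------------------------------------------

theorem pv_nc_getD (rand_a rand_b p num_colors : Int) (l : List (Int × Int))
    (d : PySem.Dict Int Int) (x : Int) :
    (l.foldl (fun d e =>
        (d.insert e.1 (PySem.Int.mod (PySem.Int.mod (rand_a * e.1 + rand_b) p) num_colors)).insert
          e.2 (PySem.Int.mod (PySem.Int.mod (rand_a * e.2 + rand_b) p) num_colors)) d).getD x 0 =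
      if ∃ e ∈ l, x = e.1 ∨ x = e.2 then pvCol rand_a rand_b p num_colors x
      else d.getD x 0 := by
  induction l generalizing d with
  | nil => simp
  | cons e l ih =>
    rw [List.foldl_cons, ih]
    by_cases hl : ∃ e' ∈ l, x = e'.1 ∨ x = e'.2
    · simp [hl]
    · by_cases h2 : x = e.2
      · subst h2
        simp [hl, pvCol]
      · by_cases h1 : x = e.1
        · subst h1
          simp [hl, h2, PySem.Dict.getD_insert, pvCol]
        · have : ¬ ∃ e' ∈ e :: l, x = e'.1 ∨ x = e'.2 := by
            simp only [List.mem_cons]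
            rintro ⟨e', (rfl | he'), h⟩
            · exact absurd h (by simp [h1, h2])
            · exact hl ⟨e', he', h⟩
          simp [hl, PySem.Dict.getD_insert, h1, h2]

-- norm set --------------------------------------------------------------------

theorem pv_norm_mem (l : List (Int × Int)) (s : PySem.Set (Int × Int)) (pr : Int × Int) :
    pr ∈ l.foldl (fun s e => if e.1 ≠ e.2 then
        PySem.Set.add s (if e.1 < e.2 then (e.1, e.2) else (e.2, e.1)) else s) s ↔
      pr ∈ s ∨ ∃ e ∈ l, e.1 ≠ e.2 ∧ pr = (if e.1 < e.2 then (e.1, e.2) else (e.2, e.1)) := by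
  induction l generalizing s with
  | nil => simp
  | cons e l ih =>
    rw [List.foldl_cons, ih]
    by_cases he : e.1 ≠ e.2
    · rw [if_pos he]
      simp only [PySem.Set.mem_add, List.mem_cons]
      constructor
      · rintro ((h | rfl) | h)
        · exact Or.inl h
        · exact Or.inr ⟨e, Or.inl rfl, he, rfl⟩
        · obtain ⟨e', he', h⟩ := h
          exact Or.inr ⟨e', Or.inr he', h⟩
      · rintro (h | ⟨e', (rfl | he'), h1, h2⟩)
        · exact Or.inl (Or.inl h)
        · exact Or.inl (Or.inr h2)
        · exact Or.inr ⟨e', he', h1, h2⟩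
    · rw [if_neg he]
      simp only [List.mem_cons]
      constructor
      · rintro (h | ⟨e', he', hh⟩)
        · exact Or.inl h
        · exact Or.inr ⟨e', Or.inr he', hh⟩
      · rintro (h | ⟨e', (rfl | he'), h1, h2⟩)
        · exact Or.inl h
        · exact absurd h1 he
        · exact Or.inr ⟨e', he', h1, h2⟩

theorem pv_norm_nodup (edges : List (Int × Int)) : (pvNorm edges).Nodup := by
  unfold pvNorm
  generalize hs : (PySem.Set.empty : PySem.Set (Int × Int)) = s
  have hnd : s.Nodup := by rw [← hs]; exact List.nodup_nil
  clear hs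
  induction edges generalizing s with
  | nil => exact hnd
  | cons e l ih =>
    rw [List.foldl_cons]
    split
    · exact ih _ (PySem.Set.nodup_add _ _ hnd)
    · exact ih _ hnd

theorem pv_norm_char (edges : List (Int × Int)) (pr : Int × Int) :
    pr ∈ pvNorm edges ↔ pr.1 < pr.2 ∧ pvAdjRel edges pr.1 pr.2 := by
  unfold pvNorm
  rw [pv_norm_mem]
  simp only [PySem.Set.empty, List.not_mem_nil, false_or]
  constructor
  · rintro ⟨e, he, hne, rfl⟩
    by_cases hlt : e.1 < e.2
    · simp [hlt, pvAdjRel]; exact Or.inl he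
    · have : e.2 < e.1 := lt_of_le_of_ne (not_lt.mp hlt) (fun h => hne h.symm)
      simp [hlt, this, pvAdjRel]; exact Or.inr he
  · rintro ⟨hlt, h | h⟩
    · exact ⟨pr, h, by omega, by simp [hlt]⟩
    · refine ⟨(pr.2, pr.1), h, by simp; omega, by simp [not_lt.mpr (le_of_lt hlt)]⟩

-- counting helpers ------------------------------------------------------------

theorem pv_countP_iff (S1 S2 : List Int) (h1 : S1.Nodup) (h2 : S2.Nodup)
    (p1 p2 : Int → Bool) (h : ∀ w, (w ∈ S1 ∧ p1 w = true) ↔ (w ∈ S2 ∧ p2 w = true)) :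
    S1.countP p1 = S2.countP p2 := by
  rw [List.countP_eq_length_filter, List.countP_eq_length_filter]
  refine List.Perm.length_eq ?_
  rw [List.perm_ext_iff_of_nodup (h1.filter _) (h2.filter _)]
  intro a
  rw [List.mem_filter, List.mem_filter]
  exact h a

theorem pv_contains_eq {α : Type} [BEq α] [LawfulBEq α] (s : PySem.Set α) (x : α) :
    PySem.Set.contains s x = decide (x ∈ s) := by
  by_cases h : x ∈ s
  · simp [h]
  · simp only [h, decide_false]
    by_contra hb
    exact h ((PySem.Set.contains_iff s x).mp (by simpa using hb))

theorem pv_adjrel_symm {edges : List (Int × Int)} {v u : Int} (h : pvAdjRel edges v u) :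
    pvAdjRel edges u v := h.symm

theorem pv_endpoint_iff (edges : List (Int × Int)) (x : Int) :
    (∃ e ∈ edges, x = e.1 ∨ x = e.2) ↔ ∃ u, pvAdjRel edges x u := by
  constructor
  · rintro ⟨e, he, h | h⟩
    · exact ⟨e.2, Or.inl (by rw [h]; simpa using he)⟩
    · exact ⟨e.1, Or.inr (by rw [h]; simpa using he)⟩
  · rintro ⟨u, h | h⟩
    · exact ⟨(x, u), h, Or.inl rfl⟩
    · exact ⟨(u, x), h, Or.inr rfl⟩

/-- A's triple loop, over any dicts that agree with the adjacency structure / colors. -/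
theorem pv_loopA_sum (colors : List Int) (edges : List (Int × Int))
    (rand_a rand_b p num_colors : Int)
    (nb : PySem.Dict Int (PySem.Set Int)) (ncD : PySem.Dict Int Int)
    (hnb : nb = pvAdj edges)
    (hc : ∀ x, (∃ u, pvAdjRel edges x u) → ncD.getD x 0 = pvCol rand_a rand_b p num_colors x) :
    (nb.keys.foldl (fun tc v =>
      (nb.getD v PySem.Set.empty).foldl (fun tc u =>
        if u > v then
          (nb.getD u PySem.Set.empty).foldl (fun tc w =>
            if decide (w > u) && PySem.Set.contains (nb.getD v PySem.Set.empty) w then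
              if colors = PySem.List.sorted [ncD.getD u 0, ncD.getD v 0, ncD.getD w 0] (fun x => x)
              then tc + 1 else tc
            else tc) tc
        else tc) tc) 0)
    = ((pvAdj edges).keys.map (fun v =>
        ((pvN edges v).map (fun u =>
          if u > v then pvF colors edges rand_a rand_b p num_colors v u else 0)).sum)).sum := by
  subst hnb
  have hNN : ∀ y, (pvAdj edges).getD y PySem.Set.empty = pvN edges y := fun _ => rfl
  simp only [hNN]
  have hOut : ∀ (acc : Int), ∀ v ∈ (pvAdj edges).keys,
      (pvN edges v).foldl (fun tc u =>
        if u > v then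
          (pvN edges u).foldl (fun tc w =>
            if decide (w > u) && PySem.Set.contains (pvN edges v) w then
              if colors = PySem.List.sorted [ncD.getD u 0, ncD.getD v 0, ncD.getD w 0] (fun x => x)
              then tc + 1 else tc
            else tc) tc
        else tc) acc
      = acc + ((pvN edges v).map (fun u =>
          if u > v then pvF colors edges rand_a rand_b p num_colors v u else 0)).sum := by
    intro acc v hv
    have hMid : ∀ (acc' : Int), ∀ u ∈ pvN edges v,
        (if u > v then
          (pvN edges u).foldl (fun tc w =>
            if decide (w > u) && PySem.Set.contains (pvN edges v) w then
              if colors = PySem.List.sorted [ncD.getD u 0, ncD.getD v 0, ncD.getD w 0] (fun x => x)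
              then tc + 1 else tc
            else tc) acc'
        else acc')
        = acc' + (if u > v then pvF colors edges rand_a rand_b p num_colors v u else 0) := by
      intro acc' u hu
      have huv : pvAdjRel edges v u := (pv_mem_N edges v u).mp hu
      by_cases h : u > v
      · rw [if_pos h, if_pos h]
        have hInn : ∀ (tc : Int), ∀ w ∈ pvN edges u,
            (if decide (w > u) && PySem.Set.contains (pvN edges v) w then
              if colors = PySem.List.sorted [ncD.getD u 0, ncD.getD v 0, ncD.getD w 0] (fun x => x)
              then tc + 1 else tc
            else tc)
            = (if (decide (w > u) && decide (w ∈ pvN edges v) &&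
                  decide (colors = PySem.List.sorted
                    [pvCol rand_a rand_b p num_colors u, pvCol rand_a rand_b p num_colors v,
                     pvCol rand_a rand_b p num_colors w] (fun x => x))) = true
              then tc + 1 else tc) := by
          intro tc w hw
          have huw : pvAdjRel edges u w := (pv_mem_N edges u w).mp hw
          rw [hc u ⟨v, pv_adjrel_symm huv⟩, hc v ⟨u, huv⟩, hc w ⟨u, pv_adjrel_symm huw⟩,
            pv_contains_eq]
          by_cases h1 : w > u <;>
            by_cases h2 : w ∈ pvN edges v <;>
              by_cases h3 : colors = PySem.List.sorted
                [pvCol rand_a rand_b p num_colors u, pvCol rand_a rand_b p num_colors v,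
                 pvCol rand_a rand_b p num_colors w] (fun x => x) <;>
            simp [h1, h2, h3]
        rw [PySem.List.foldl_congr_mem _ _ _ acc' hInn, PySem.List.foldl_if_add_one]
        rfl
      · rw [if_neg h, if_neg h, add_zero]
    rw [PySem.List.foldl_congr_mem _ _ _ acc hMid, PySem.List.foldl_add]
  rw [PySem.List.foldl_congr_mem _ _ _ 0 hOut, PySem.List.foldl_add, zero_add]

theorem pv_A_eq_sum (colors_tuple : List Int) (edges : List (Int × Int))
    (rand_a rand_b p num_colors : Int) :
    count_triangles2 colors_tuple edges rand_a rand_b p num_colors =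
      ((pvAdj edges).keys.map (fun v =>
        ((pvN edges v).map (fun u =>
          if u > v then pvF colors_tuple edges rand_a rand_b p num_colors v u else 0)).sum)).sum := by
  have hc : ∀ x, (∃ u, pvAdjRel edges x u) →
      (edges.foldl (fun d (e : Int × Int) =>
        (d.insert e.1 (PySem.Int.mod (PySem.Int.mod (rand_a * e.1 + rand_b) p) num_colors)).insert
          e.2 (PySem.Int.mod (PySem.Int.mod (rand_a * e.2 + rand_b) p) num_colors))
        PySem.Dict.empty).getD x 0 = pvCol rand_a rand_b p num_colors x := by
    intro x hx
    rw [pv_nc_getD, if_pos ((pv_endpoint_iff edges x).mpr hx)]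
  unfold count_triangles2
  dsimp only
  rw [PySem.List.foldl_prod_mk
    (fun (d : PySem.Dict Int (PySem.Set Int)) (e : Int × Int) => (d.modify e.1 PySem.Set.empty (fun s => PySem.Set.add s e.2)).modify
      e.2 PySem.Set.empty (fun s => PySem.Set.add s e.1))
    (fun (d : PySem.Dict Int Int) (e : Int × Int) =>
      (d.insert e.1 (PySem.Int.mod (PySem.Int.mod (rand_a * e.1 + rand_b) p) num_colors)).insert
        e.2 (PySem.Int.mod (PySem.Int.mod (rand_a * e.2 + rand_b) p) num_colors))
    edges PySem.Dict.empty PySem.Dict.empty]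
  exact pv_loopA_sum colors_tuple edges rand_a rand_b p num_colors _ _ (pv_adj_fold_eq edges PySem.Dict.empty) hc

-- A-side regrouping: the keys/neighbor double sum equals the normalized-edge sum ----

theorem pv_sums_eq (colors_tuple : List Int) (edges : List (Int × Int))
    (rand_a rand_b p num_colors : Int) :
    ((pvAdj edges).keys.map (fun v =>
        ((pvN edges v).map (fun u =>
          if u > v then pvF colors_tuple edges rand_a rand_b p num_colors v u else 0)).sum)).sum =
      ((pvNorm edges).map
        (fun pr => pvF colors_tuple edges rand_a rand_b p num_colors pr.1 pr.2)).sum := by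
  rw [← List.sum_toFinset _ (pv_nodup_keys edges),
      ← List.sum_toFinset _ (pv_norm_nodup edges)]
  have hinner : ∀ v ∈ (pvAdj edges).keys.toFinset,
      ((pvN edges v).map (fun u =>
        if u > v then pvF colors_tuple edges rand_a rand_b p num_colors v u else 0)).sum =
      ∑ u ∈ ((pvN edges v).toFinset.filter (fun u => v < u)),
        pvF colors_tuple edges rand_a rand_b p num_colors v u := by
    intro v _
    rw [← List.sum_toFinset _ (pv_nodup_N edges v), Finset.sum_filter]
  rw [Finset.sum_congr rfl hinner, Finset.sum_sigma']
  refine Finset.sum_nbij' (fun x => (x.1, x.2)) (fun q => ⟨q.1, q.2⟩) ?_ ?_ ?_ ?_ ?_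
  · rintro ⟨v, u⟩ hm
    rw [Finset.mem_sigma] at hm
    obtain ⟨hv, hu⟩ := hm
    rw [Finset.mem_filter] at hu
    obtain ⟨hu, hlt⟩ := hu
    rw [List.mem_toFinset] at hu ⊢
    exact (pv_norm_char edges (v, u)).mpr ⟨hlt, (pv_mem_N edges v u).mp hu⟩
  · rintro ⟨v, u⟩ hq
    rw [List.mem_toFinset] at hq
    obtain ⟨hlt, hadj⟩ := (pv_norm_char edges (v, u)).mp hq
    rw [Finset.mem_sigma, Finset.mem_filter, List.mem_toFinset, List.mem_toFinset]
    exact ⟨(pv_mem_keys edges v).mpr ⟨u, hadj⟩, (pv_mem_N edges v u).mpr hadj, hlt⟩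
  · rintro ⟨v, u⟩ _; rfl
  · rintro ⟨v, u⟩ _; rfl
  · rintro ⟨v, u⟩ _; rfl

-- B-side vocabulary and lemmas ------------------------------------------------

/-- the 'greater' dict built by B's second pass over any pair list -/
def pvGrFold (l : List (Int × Int)) (d : PySem.Dict Int (List Int)) : PySem.Dict Int (List Int) :=
  l.foldl (fun d e => d.modify e.1 ([] : List Int) (fun lst => lst ++ [e.2])) d

theorem pv_gr_getD (l : List (Int × Int)) (d : PySem.Dict Int (List Int)) (v : Int) :
    (pvGrFold l d).getD v [] =
      d.getD v [] ++ (l.filter (fun e => decide (e.1 = v))).map Prod.snd := by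
  induction l generalizing d with
  | nil => simp [pvGrFold]
  | cons e l ih =>
    unfold pvGrFold at *
    rw [List.foldl_cons, ih]
    rw [PySem.Dict.getD_modify]
    by_cases he : e.1 = v
    · subst he
      simp
    · simp [he, Ne.symm he]

theorem pv_gr_keys (edges : List (Int × Int)) :
    (pvGrFold (pvNorm edges) PySem.Dict.empty).keys =
      PySem.Set.ofList ((pvNorm edges).map Prod.fst) := by
  unfold pvGrFold
  have h := PySem.Dict.keys_foldl_modify_key (pvNorm edges) Prod.fst ([] : List Int)
    (fun _ e lst => lst ++ [e.2]) PySem.Dict.empty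
  simpa [PySem.Dict.keys_empty, PySem.Set.update_empty] using h

theorem pv_gr_mem_keys (edges : List (Int × Int)) (v : Int) :
    v ∈ (pvGrFold (pvNorm edges) PySem.Dict.empty).keys ↔ ∃ u, (v, u) ∈ pvNorm edges := by
  rw [pv_gr_keys, PySem.Set.mem_ofList]
  simp only [List.mem_map]
  constructor
  · rintro ⟨x, hx, rfl⟩
    exact ⟨x.2, hx⟩
  · rintro ⟨u, hu⟩
    exact ⟨(v, u), hu, rfl⟩

theorem pv_gr_nodup_keys (edges : List (Int × Int)) :
    (pvGrFold (pvNorm edges) PySem.Dict.empty).keys.Nodup := by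
  rw [pv_gr_keys]; exact PySem.Set.nodup_ofList _

/-- B's per-apex greater-neighbor list -/
def pvGlst (edges : List (Int × Int)) (v : Int) : List Int :=
  (pvGrFold (pvNorm edges) PySem.Dict.empty).getD v []

theorem pv_glst_eq (edges : List (Int × Int)) (v : Int) :
    pvGlst edges v = ((pvNorm edges).filter (fun e => decide (e.1 = v))).map Prod.snd := by
  unfold pvGlst
  rw [pv_gr_getD]
  simp [PySem.Dict.getD_empty]

theorem pv_glst_mem (edges : List (Int × Int)) (v u : Int) :
    u ∈ pvGlst edges v ↔ (v, u) ∈ pvNorm edges := by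
  rw [pv_glst_eq]
  simp only [List.mem_map, List.mem_filter, decide_eq_true_eq]
  constructor
  · rintro ⟨e, ⟨he, h1⟩, h2⟩
    obtain ⟨a, b⟩ := e
    simp only at h1 h2
    subst h1; subst h2
    exact he
  · intro h
    exact ⟨(v, u), ⟨h, rfl⟩, rfl⟩

theorem pv_glst_nodup (edges : List (Int × Int)) (v : Int) : (pvGlst edges v).Nodup := by
  rw [pv_glst_eq]
  refine List.Nodup.map_on ?_ ((pv_norm_nodup edges).filter _)
  rintro ⟨a, b⟩ ha ⟨c, d⟩ hc h
  rw [List.mem_filter] at ha hc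
  simp only [decide_eq_true_eq] at ha hc
  simp only at h
  simp [ha.2, hc.2, h]

/-- B's sorted list: membership, nodup, strict order -/
theorem pv_slst_mem (edges : List (Int × Int)) (v u : Int) :
    u ∈ PySem.List.sorted (pvGlst edges v) (fun x => x) ↔ (v, u) ∈ pvNorm edges := by
  rw [PySem.List.mem_sorted, pv_glst_mem]

theorem pv_slst_nodup (edges : List (Int × Int)) (v : Int) :
    (PySem.List.sorted (pvGlst edges v) (fun x => x)).Nodup := by
  exact (PySem.List.sorted_perm (pvGlst edges v) (fun x => x) false).nodup_iff.mpr
    (pv_glst_nodup edges v)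

theorem pv_slst_pairwise (edges : List (Int × Int)) (v : Int) :
    (PySem.List.sorted (pvGlst edges v) (fun x => x)).Pairwise (· < ·) := by
  have hle := PySem.List.sorted_pairwise (pvGlst edges v) (fun x => x)
  have hne : (PySem.List.sorted (pvGlst edges v) (fun x => x)).Pairwise (· ≠ ·) :=
    pv_slst_nodup edges v
  exact (hle.and hne).imp (fun h => lt_of_le_of_ne h.1 h.2)

/-- the pair-scan loop as a double count over a strictly increasing list -/
theorem pv_pairScan_sum (target : List Int) (eset : PySem.Set (Int × Int))
    (col : PySem.Dict Int Int) (cv : Int) (l : List Int) (hl : l.Pairwise (· < ·)) (acc : Int) :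
    pvPairScan target eset col cv l acc =
      acc + (l.map (fun u => ((l.countP (fun w => decide (u < w) &&
        (PySem.Set.contains eset (u, w) &&
         decide (PySem.List.sorted [cv, col.getD u 0, col.getD w 0] (fun x => x) = target)))) : Int))).sum := by
  induction l generalizing acc with
  | nil => simp [pvPairScan]
  | cons u rest ih =>
    rw [List.pairwise_cons] at hl
    obtain ⟨hu, hrest⟩ := hl
    show pvPairScan target eset col cv rest
        (rest.foldl (fun c w =>
          if PySem.Set.contains eset (u, w) &&
             decide (PySem.List.sorted [cv, col.getD u 0, col.getD w 0] (fun x => x) = target)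
          then c + 1 else c) acc) = _
    rw [PySem.List.foldl_if_add_one, ih hrest]
    rw [List.map_cons, List.sum_cons]
    have hhead : ((u :: rest).countP (fun w => decide (u < w) &&
        (PySem.Set.contains eset (u, w) &&
         decide (PySem.List.sorted [cv, col.getD u 0, col.getD w 0] (fun x => x) = target))))
        = rest.countP (fun w =>
          PySem.Set.contains eset (u, w) &&
          decide (PySem.List.sorted [cv, col.getD u 0, col.getD w 0] (fun x => x) = target)) := by
      rw [List.countP_cons]
      have h0 : (decide (u < u) && (PySem.Set.contains eset (u, u) &&
          decide (PySem.List.sorted [cv, col.getD u 0, col.getD u 0] (fun x => x) = target))) = false := by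
        simp
      rw [h0, if_neg (by simp), add_zero]
      refine List.countP_congr (fun w hw => ?_)
      have : decide (u < w) = true := by simp [hu w hw]
      rw [this, Bool.true_and]
    have htail : ∀ u' ∈ rest,
        ((u :: rest).countP (fun w => decide (u' < w) &&
          (PySem.Set.contains eset (u', w) &&
           decide (PySem.List.sorted [cv, col.getD u' 0, col.getD w 0] (fun x => x) = target))))
        = (rest.countP (fun w => decide (u' < w) &&
          (PySem.Set.contains eset (u', w) &&
           decide (PySem.List.sorted [cv, col.getD u' 0, col.getD w 0] (fun x => x) = target)))) := by
      intro u' hu'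
      rw [List.countP_cons]
      have : decide (u' < u) = false := by
        simp only [decide_eq_false_iff_not, not_lt]
        exact le_of_lt (hu u' hu')
      simp [this]
    have hmap : rest.map (fun u' => (((u :: rest).countP (fun w => decide (u' < w) &&
          (PySem.Set.contains eset (u', w) &&
           decide (PySem.List.sorted [cv, col.getD u' 0, col.getD w 0] (fun x => x) = target)))) : Int))
        = rest.map (fun u' => ((rest.countP (fun w => decide (u' < w) &&
          (PySem.Set.contains eset (u', w) &&
           decide (PySem.List.sorted [cv, col.getD u' 0, col.getD w 0] (fun x => x) = target)))) : Int)) := by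
      refine List.map_congr_left (fun u' hu' => ?_)
      rw [htail u' hu']
    rw [hhead, hmap]
    ring

/-- sorted color triples: swapping the first two entries does not change the result -/
theorem pv_sorted_swap (a b c : Int) :
    PySem.List.sorted [a, b, c] (fun x => x) = PySem.List.sorted [b, a, c] (fun x => x) := by
  exact (PySem.List.sorted_id_eq_sorted_id_iff_perm [a, b, c] [b, a, c]).mpr (List.Perm.swap' b a (List.Perm.refl [c]))

/-- the per-(v,u) inner count of B equals pvF -/
theorem pv_inner_eq_F (colors_tuple : List Int) (edges : List (Int × Int))
    (rand_a rand_b p num_colors : Int) (col : PySem.Dict Int Int)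
    (hc : ∀ x, (∃ e ∈ pvNorm edges, x = e.1 ∨ x = e.2) →
      col.getD x 0 = pvCol rand_a rand_b p num_colors x)
    (v u : Int) (hvu : (v, u) ∈ pvNorm edges) :
    (((PySem.List.sorted (pvGlst edges v) (fun x => x)).countP (fun w => decide (u < w) &&
        (PySem.Set.contains (pvNorm edges) (u, w) &&
         decide (PySem.List.sorted [col.getD v 0, col.getD u 0, col.getD w 0] (fun x => x)
           = colors_tuple)))) : Int)
      = pvF colors_tuple edges rand_a rand_b p num_colors v u := by
  have hvlt : v < u := ((pv_norm_char edges (v, u)).mp hvu).1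
  have hcu : col.getD u 0 = pvCol rand_a rand_b p num_colors u := hc u ⟨(v, u), hvu, Or.inr rfl⟩
  have hcv : col.getD v 0 = pvCol rand_a rand_b p num_colors v := hc v ⟨(v, u), hvu, Or.inl rfl⟩
  unfold pvF
  rw [Nat.cast_inj]
  refine pv_countP_iff _ _ (pv_slst_nodup edges v) (pv_nodup_N edges u) _ _ (fun w => ?_)
  constructor
  · rintro ⟨hw, hp⟩
    have hvw : (v, w) ∈ pvNorm edges := (pv_slst_mem edges v w).mp hw
    have hcw : col.getD w 0 = pvCol rand_a rand_b p num_colors w :=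
      hc w ⟨(v, w), hvw, Or.inr rfl⟩
    rw [pv_contains_eq] at hp
    simp only [Bool.and_eq_true, decide_eq_true_eq] at hp
    obtain ⟨hlt, hmem, hceq⟩ := hp
    have huw : (u, w) ∈ pvNorm edges := hmem
    have hadjuw : pvAdjRel edges u w := ((pv_norm_char edges (u, w)).mp huw).2
    have hadjvw : pvAdjRel edges v w := ((pv_norm_char edges (v, w)).mp hvw).2
    refine ⟨(pv_mem_N edges u w).mpr hadjuw, ?_⟩
    simp only [Bool.and_eq_true, decide_eq_true_eq]
    refine ⟨⟨hlt, (pv_mem_N edges v w).mpr hadjvw⟩, ?_⟩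
    rw [hcu, hcv, hcw] at hceq
    rw [← hceq, pv_sorted_swap]
  · rintro ⟨hw, hp⟩
    simp only [Bool.and_eq_true, decide_eq_true_eq] at hp
    obtain ⟨⟨hlt, hmemN⟩, hceq⟩ := hp
    have hadjuw : pvAdjRel edges u w := (pv_mem_N edges u w).mp hw
    have hadjvw : pvAdjRel edges v w := (pv_mem_N edges v w).mp hmemN
    have huw : (u, w) ∈ pvNorm edges := (pv_norm_char edges (u, w)).mpr ⟨hlt, hadjuw⟩
    have hvw : (v, w) ∈ pvNorm edges := (pv_norm_char edges (v, w)).mpr ⟨by omega, hadjvw⟩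
    have hcw : col.getD w 0 = pvCol rand_a rand_b p num_colors w :=
      hc w ⟨(v, w), hvw, Or.inr rfl⟩
    refine ⟨(pv_slst_mem edges v w).mpr hvw, ?_⟩
    rw [pv_contains_eq]
    simp only [Bool.and_eq_true, decide_eq_true_eq]
    refine ⟨hlt, huw, ?_⟩
    rw [hcu, hcv, hcw, pv_sorted_swap, ← hceq]

/-- B-side regrouping: per-apex sums over sorted greater lists = normalized-edge sum -/
theorem pv_B_regroup (colors_tuple : List Int) (edges : List (Int × Int))
    (rand_a rand_b p num_colors : Int) :
    (((pvGrFold (pvNorm edges) PySem.Dict.empty).keys).map (fun v =>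
      ((PySem.List.sorted (pvGlst edges v) (fun x => x)).map
        (fun u => pvF colors_tuple edges rand_a rand_b p num_colors v u)).sum)).sum =
    ((pvNorm edges).map
      (fun pr => pvF colors_tuple edges rand_a rand_b p num_colors pr.1 pr.2)).sum := by
  rw [← List.sum_toFinset _ (pv_gr_nodup_keys edges),
      ← List.sum_toFinset _ (pv_norm_nodup edges)]
  have hinner : ∀ v ∈ ((pvGrFold (pvNorm edges) PySem.Dict.empty).keys).toFinset,
      ((PySem.List.sorted (pvGlst edges v) (fun x => x)).map
        (fun u => pvF colors_tuple edges rand_a rand_b p num_colors v u)).sum =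
      ∑ u ∈ (PySem.List.sorted (pvGlst edges v) (fun x => x)).toFinset,
        pvF colors_tuple edges rand_a rand_b p num_colors v u := by
    intro v _
    rw [← List.sum_toFinset _ (pv_slst_nodup edges v)]
  rw [Finset.sum_congr rfl hinner, Finset.sum_sigma']
  refine Finset.sum_nbij' (fun x => (x.1, x.2)) (fun q => ⟨q.1, q.2⟩) ?_ ?_ ?_ ?_ ?_
  · rintro ⟨v, u⟩ hm
    rw [Finset.mem_sigma] at hm
    obtain ⟨hv, hu⟩ := hm
    rw [List.mem_toFinset] at hu ⊢
    exact (pv_slst_mem edges v u).mp hu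
  · rintro ⟨v, u⟩ hq
    rw [List.mem_toFinset] at hq
    rw [Finset.mem_sigma, List.mem_toFinset, List.mem_toFinset]
    exact ⟨(pv_gr_mem_keys edges v).mpr ⟨u, hq⟩, (pv_slst_mem edges v u).mpr hq⟩
  · rintro ⟨v, u⟩ _; rfl
  · rintro ⟨v, u⟩ _; rfl
  · rintro ⟨v, u⟩ _; rfl

theorem pv_B_eq_sum (colors_tuple : List Int) (edges : List (Int × Int))
    (rand_a rand_b p num_colors : Int) :
    count_triangles2_alt colors_tuple edges rand_a rand_b p num_colors =
      ((pvNorm edges).map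
        (fun pr => pvF colors_tuple edges rand_a rand_b p num_colors pr.1 pr.2)).sum := by
  unfold count_triangles2_alt
  dsimp only
  rw [show (edges.foldl (fun (s : PySem.Set (Int × Int)) e =>
      if e.1 ≠ e.2 then PySem.Set.add s (if e.1 < e.2 then (e.1, e.2) else (e.2, e.1)) else s)
      PySem.Set.empty) = pvNorm edges from rfl]
  rw [PySem.List.foldl_prod_mk
    (fun (d : PySem.Dict Int Int) (e : Int × Int) =>
      (d.insert e.1 (PySem.Int.mod (PySem.Int.mod (rand_a * e.1 + rand_b) p) num_colors)).insert
        e.2 (PySem.Int.mod (PySem.Int.mod (rand_a * e.2 + rand_b) p) num_colors))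
    (fun (d : PySem.Dict Int (List Int)) (e : Int × Int) =>
      d.modify e.1 ([] : List Int) (fun lst => lst ++ [e.2]))
    (pvNorm edges) PySem.Dict.empty PySem.Dict.empty]
  have hc : ∀ x, (∃ e ∈ pvNorm edges, x = e.1 ∨ x = e.2) →
      ((pvNorm edges).foldl (fun (d : PySem.Dict Int Int) (e : Int × Int) =>
        (d.insert e.1 (PySem.Int.mod (PySem.Int.mod (rand_a * e.1 + rand_b) p) num_colors)).insert
          e.2 (PySem.Int.mod (PySem.Int.mod (rand_a * e.2 + rand_b) p) num_colors))
        PySem.Dict.empty).getD x 0 = pvCol rand_a rand_b p num_colors x := by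
    intro x hx
    rw [pv_nc_getD, if_pos hx]
  have hgr : ((pvNorm edges).foldl (fun (d : PySem.Dict Int (List Int)) (e : Int × Int) =>
      d.modify e.1 ([] : List Int) (fun lst => lst ++ [e.2])) PySem.Dict.empty)
      = pvGrFold (pvNorm edges) PySem.Dict.empty := rfl
  rw [hgr]
  set colD := ((pvNorm edges).foldl (fun (d : PySem.Dict Int Int) (e : Int × Int) =>
    (d.insert e.1 (PySem.Int.mod (PySem.Int.mod (rand_a * e.1 + rand_b) p) num_colors)).insert
      e.2 (PySem.Int.mod (PySem.Int.mod (rand_a * e.2 + rand_b) p) num_colors))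
    PySem.Dict.empty) with hcolD
  have hOut : ∀ (acc : Int), ∀ v ∈ (pvGrFold (pvNorm edges) PySem.Dict.empty).keys,
      pvPairScan colors_tuple (pvNorm edges) colD (colD.getD v 0)
        (PySem.List.sorted ((pvGrFold (pvNorm edges) PySem.Dict.empty).getD v []) (fun x => x)) acc
      = acc + ((PySem.List.sorted (pvGlst edges v) (fun x => x)).map
          (fun u => pvF colors_tuple edges rand_a rand_b p num_colors v u)).sum := by
    intro acc v hv
    have hlst : ((pvGrFold (pvNorm edges) PySem.Dict.empty).getD v []) = pvGlst edges v := rfl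
    rw [hlst, pv_pairScan_sum _ _ _ _ _ (pv_slst_pairwise edges v)]
    congr 1
    refine congrArg List.sum (List.map_congr_left (fun u hu => ?_))
    have hvu : (v, u) ∈ pvNorm edges := (pv_slst_mem edges v u).mp hu
    exact pv_inner_eq_F colors_tuple edges rand_a rand_b p num_colors colD hc v u hvu
  rw [PySem.List.foldl_congr_mem _ _ _ 0 hOut, PySem.List.foldl_add, zero_add]
  exact pv_B_regroup colors_tuple edges rand_a rand_b p num_colors

-- ===== VERDICT (by name: the statement is the Claim_ definition above) =====
theorem count_triangles2_spec : Claim_equal_count_triangles2 := by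
  intro colors_tuple edges rand_a rand_b p num_colors _ _
  unfold Spec_count_triangles2
  rw [pv_A_eq_sum, pv_sums_eq, pv_B_eq_sum]
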